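-- pv_equiv track=rewrite | github.com/birshert/CodeSwitchingAdversarial | code/adversarial.py | mapping_alignments
-- ===== SOURCE A (Python) =====
-- from collections import defaultdict
--
-- def mapping_alignments(lines, data):
--     """
--     Create mapping for alignments and dataset (alignments should be for this dataset).
--     :param lines: lines generated with awesome-align.
--     :param data: array with texts.
--     :return: dict with alignments: (line_idx: dict[token_idx: list[str(tokens)]]).
--     """
--     if len(lines) != len(data):
--         raise ValueError('Alignments should be from this data.')
--
--     mapping: dict = {}
--
--     for idx, line in enumerate(lines):
--         mapping[idx] = defaultdict(list)
--         text = data[idx].strip().split()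
--
--         for elem in line.split():
--             key, value = map(int, elem.split('-'))
--             mapping[idx][key].append(text[value])
--
--         mapping[idx] = dict(mapping[idx])
--
--     return mapping
-- ===== SOURCE B (Python) =====
-- def _line_mapping(line, text):
--     """Group one line's alignment pairs by source index, keys in first-occurrence order."""
--     pairs = [tuple(map(int, e.split('-'))) for e in line.split()]
--     keys = list(dict.fromkeys(k for k, _ in pairs))
--     return {k: [text[v] for k2, v in pairs if k2 == k] for k in keys}
--
--
-- def mapping_alignments(lines, data):
--     """
--     Create mapping for alignments and dataset (alignments should be for this dataset).
--     Staged alternative: parse all pairs of a line first, compute the ordered distinct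
--     keys, then build each per-line dict by grouping comprehensions (no defaultdict,
--     no mutation loops).
--     """
--     if len(lines) != len(data):
--         raise ValueError('Alignments should be from this data.')
--     return {idx: _line_mapping(line, data[idx].strip().split())
--             for idx, line in enumerate(lines)}
-- ===== Notes on version B (the rewrite author's own statement) =====
-- stated objective: alternative
-- what changed: B replaces A's outer mutation loop and per-line append-into-defaultdict pass by a staged pipeline: parse all pairs of a line up front, compute the ordered distinct keys with dict.fromkeys, and build everything with dict/list comprehensions (a per-key grouping rescan instead of per-pair appends).
import Mathlib
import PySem

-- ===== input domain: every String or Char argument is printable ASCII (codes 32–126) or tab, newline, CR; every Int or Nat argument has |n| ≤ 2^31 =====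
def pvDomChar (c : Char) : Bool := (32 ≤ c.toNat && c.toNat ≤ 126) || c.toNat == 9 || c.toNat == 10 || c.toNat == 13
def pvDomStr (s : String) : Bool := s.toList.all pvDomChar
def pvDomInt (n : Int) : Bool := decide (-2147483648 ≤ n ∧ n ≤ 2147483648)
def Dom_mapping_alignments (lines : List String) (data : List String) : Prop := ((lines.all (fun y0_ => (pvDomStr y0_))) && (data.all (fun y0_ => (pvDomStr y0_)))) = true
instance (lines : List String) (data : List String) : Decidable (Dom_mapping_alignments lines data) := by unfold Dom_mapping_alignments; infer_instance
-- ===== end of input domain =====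

-- B replaces A's outer mutation loop and per-line defaultdict append pass by a staged
-- pipeline: parse all pairs, take ordered distinct keys, group by comprehension
-- (objective: alternative).

-- ===== PORT A =====
-- literal transliteration of A: enumerate(lines), per-line defaultdict(list) append loop
def mapping_alignments (lines : List String) (data : List String) : List (Int × List (Int × List String)) :=
  if lines.length ≠ data.length then []  -- Python raises ValueError here; excluded by Pre_
  else
    ((PySem.List.enumerate lines 0).foldl
      (fun (m : PySem.Dict Int (List (Int × List String))) p =>
        let idx := p.1
        let line := p.2
        let text := PySem.Str.split₀ (PySem.Str.strip (PySem.List.pyGetD data idx ""))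
        let inner : PySem.Dict Int (List String) :=
          (PySem.Str.split₀ line).foldl
            (fun d elem =>
              let parts := (PySem.Str.split? elem "-").getD []
              let key := (PySem.Int.ofStr? (parts.getD 0 "")).getD 0
              let value := (PySem.Int.ofStr? (parts.getD 1 "")).getD 0
              d.modify key [] (· ++ [PySem.List.pyGetD text value ""]))
            PySem.Dict.empty
        m.insert idx inner.items)
      PySem.Dict.empty).items

-- ===== PORT B =====
-- literal transliteration of Source B's _line_mapping: parse pairs, dedup keys, group
def lineMapping (line : String) (text : List String) : List (Int × List String) :=
  let pairs : List (Int × Int) :=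
    (PySem.Str.split₀ line).map (fun e =>
      let parts := (PySem.Str.split? e "-").getD []
      (((PySem.Int.ofStr? (parts.getD 0 "")).getD 0),
       ((PySem.Int.ofStr? (parts.getD 1 "")).getD 0)))
  let keys := PySem.List.dedup (pairs.map (·.1))
  keys.map (fun k =>
    (k, (pairs.filter (fun q => q.1 == k)).map (fun q => PySem.List.pyGetD text q.2 "")))

-- literal transliteration of Source B: dict comprehension over enumerate(lines)
def mapping_alignments_alt (lines : List String) (data : List String) : List (Int × List (Int × List String)) :=
  if lines.length ≠ data.length then []  -- Python raises ValueError here; excluded by Pre_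
  else
    (PySem.List.enumerate lines 0).map (fun p =>
      (p.1, lineMapping p.2 (PySem.Str.split₀ (PySem.Str.strip (PySem.List.pyGetD data p.1 "")))))

-- ===== PRECONDITION & SPEC =====
-- Pre_ excludes exactly the inputs on which the Python A raises: mismatched lengths
-- (ValueError), alignment tokens that do not split on '-' into exactly two int()-parseable
-- parts (ValueError), and target indices outside the line's token list (IndexError).
def Pre_mapping_alignments (lines : List String) (data : List String) : Prop :=
  lines.length = data.length ∧
  ∀ p ∈ lines.zip data, ∀ elem ∈ PySem.Str.split₀ p.1,
    ((PySem.Str.split? elem "-").getD []).length = 2 ∧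
    (PySem.Int.ofStr? (((PySem.Str.split? elem "-").getD []).getD 0 "")).isSome ∧
    (PySem.Int.ofStr? (((PySem.Str.split? elem "-").getD []).getD 1 "")).isSome ∧
    PySem.Raise.InRange (PySem.Str.split₀ (PySem.Str.strip p.2)).length
      ((PySem.Int.ofStr? (((PySem.Str.split? elem "-").getD []).getD 1 "")).getD 0)
instance (lines : List String) (data : List String) : Decidable (Pre_mapping_alignments lines data) := by
  unfold Pre_mapping_alignments; infer_instance

def pvWitness_mapping_alignments : List String × List String :=
  (["0-1 1-0 0-0", ""], ["hi yo", "x"])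

def Spec_mapping_alignments (lines : List String) (data : List String) (out : List (Int × List (Int × List String))) : Prop := out = mapping_alignments_alt lines data
instance (lines : List String) (data : List String) (out : List (Int × List (Int × List String))) : Decidable (Spec_mapping_alignments lines data out) := by unfold Spec_mapping_alignments; infer_instance

-- ===== CLAIM (what is proved, stated in full; the proofs are below) =====
def Claim_equal_mapping_alignments : Prop := ∀ (lines : List String) (data : List String), Dom_mapping_alignments lines data → Pre_mapping_alignments lines data → Spec_mapping_alignments lines data (mapping_alignments lines data)

-- ===== LEMMAS AND PROOFS =====

-- proof-side abbreviations for the parsing steps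
def pvParse (elem : String) : Int × Int :=
  let parts := (PySem.Str.split? elem "-").getD []
  (((PySem.Int.ofStr? (parts.getD 0 "")).getD 0),
   ((PySem.Int.ofStr? (parts.getD 1 "")).getD 0))

def pvText (sent : String) : List String := PySem.Str.split₀ (PySem.Str.strip sent)

-- A's per-line append loop, in items form, equals B's dedup-keys grouping map
theorem pv_line_items (ps : List (Int × Int)) (t : Int → String) :
    (ps.foldl (fun d p => d.modify p.1 [] (· ++ [t p.2])) PySem.Dict.empty).items
      = (PySem.List.dedup (ps.map (·.1))).map
          (fun k => (k, (ps.filter (fun q => q.1 == k)).map (fun q => t q.2))) := by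
  have nodupA : (ps.foldl (fun d p => d.modify p.1 [] (· ++ [t p.2]))
      PySem.Dict.empty).keys.Nodup :=
    PySem.Dict.nodup_keys_foldl_modify_key ps (·.1) []
      (fun d p => (· ++ [t p.2])) PySem.Dict.empty (by simp [PySem.Dict.keys_empty])
  have keysA : (ps.foldl (fun d p => d.modify p.1 [] (· ++ [t p.2]))
      PySem.Dict.empty).keys = PySem.Set.ofList (ps.map (·.1)) := by
    rw [PySem.Dict.keys_foldl_modify_key ps (·.1) [] (fun d p => (· ++ [t p.2]))]
    simp [PySem.Dict.keys_empty, PySem.Set.update_nil_left]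
  rw [PySem.Dict.items_eq_map_keys _ nodupA [], keysA, PySem.List.dedup_eq_ofList]
  apply List.map_congr_left
  intro k _
  have hA : ps.foldl (fun d p => d.modify p.1 [] (· ++ [t p.2])) PySem.Dict.empty
      = (ps.map (fun p => (p.1, t p.2))).foldl
          (fun d p => d.modify p.1 [] (· ++ [p.2])) PySem.Dict.empty := by
    rw [List.foldl_map]
  rw [hA, PySem.Dict.getD_foldl_modify_append]
  simp [List.filter_map, Function.comp_def, List.map_map]

-- fresh increasing integer keys: A's outer dict loop is just a map over enumerate
theorem pv_outer_items {α β : Type} (xs : List α) (v : Int × α → β) :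
    ((PySem.List.enumerate xs 0).foldl
      (fun (m : PySem.Dict Int β) p => m.insert p.1 (v p)) PySem.Dict.empty).items
      = (PySem.List.enumerate xs 0).map (fun p => (p.1, v p)) := by
  have h := PySem.Dict.items_foldl_insert_fresh (PySem.List.enumerate xs 0)
    (fun p => p.1) v PySem.Dict.empty
    (by intro a _; simp [PySem.Dict.contains_empty])
    (by
      have hp := PySem.List.pairwise_lt_enumerate xs 0
      have : List.Pairwise (fun p q : Int × α => p.1 ≠ q.1) (PySem.List.enumerate xs 0) :=
        hp.imp (fun h => ne_of_lt h)
      exact (List.pairwise_map).mpr this)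
  simpa [PySem.Dict.items] using h

-- ===== VERDICT (by name: the statement is the Claim_ definition above) =====
set_option maxHeartbeats 1000000 in
theorem mapping_alignments_spec : Claim_equal_mapping_alignments := by
  intro lines data _hdom hpre
  unfold Spec_mapping_alignments
  unfold mapping_alignments mapping_alignments_alt
  rw [if_neg (fun h => h hpre.1), if_neg (fun h => h hpre.1)]
  show ((PySem.List.enumerate lines 0).foldl
      (fun (m : PySem.Dict Int (List (Int × List String))) p =>
        m.insert p.1 (((PySem.Str.split₀ p.2).foldl
          (fun d elem =>
            d.modify (pvParse elem).1 []
              (· ++ [PySem.List.pyGetD (pvText (PySem.List.pyGetD data p.1 ""))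
                (pvParse elem).2 ""]))
          PySem.Dict.empty).items))
      PySem.Dict.empty).items = _
  refine (pv_outer_items lines
    (fun p => ((PySem.Str.split₀ p.2).foldl
      (fun d elem =>
        d.modify (pvParse elem).1 []
          (· ++ [PySem.List.pyGetD (pvText (PySem.List.pyGetD data p.1 "")) (pvParse elem).2 ""]))
      PySem.Dict.empty).items)).trans ?_
  apply List.map_congr_left
  intro p _
  congr 1
  show ((PySem.Str.split₀ p.2).foldl
      (fun d elem =>
        d.modify (pvParse elem).1 []
          (· ++ [PySem.List.pyGetD (pvText (PySem.List.pyGetD data p.1 "")) (pvParse elem).2 ""]))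
      PySem.Dict.empty).items = _
  have h1 : (PySem.Str.split₀ p.2).foldl
      (fun d elem =>
        d.modify (pvParse elem).1 []
          (· ++ [PySem.List.pyGetD (pvText (PySem.List.pyGetD data p.1 "")) (pvParse elem).2 ""]))
      PySem.Dict.empty
      = ((PySem.Str.split₀ p.2).map pvParse).foldl
          (fun d q => d.modify q.1 []
            (· ++ [PySem.List.pyGetD (pvText (PySem.List.pyGetD data p.1 "")) q.2 ""]))
          PySem.Dict.empty := by
    rw [List.foldl_map]
  rw [h1, pv_line_items ((PySem.Str.split₀ p.2).map pvParse)
    (fun v => PySem.List.pyGetD (pvText (PySem.List.pyGetD data p.1 "")) v "")]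
  rfl
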